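-- pv_equiv track=rewrite | github.com/VrajeshChary/ScamSniper | flask_app.py | check_brand_impersonation
-- ===== SOURCE A (Python) =====
-- def check_brand_impersonation(domain):
--     """Check if domain might be impersonating popular brands"""
--     popular_brands = [
--         "google", "apple", "amazon", "microsoft", "facebook", "instagram",
--         "twitter", "netflix", "paypal", "ebay", "walmart", "bank", "chase",
--         "wellsfargo", "bankofamerica", "citibank", "amex", "visa", "mastercard"
--     ]
--
--     impersonation_checks = []
--     domain_parts = domain.lower().split('.')
--
--     for brand in popular_brands:
--         if brand in domain_parts[0] and brand != domain_parts[0]: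
--             # Check for typosquatting (gooogle vs google)
--             levenshtein_distance = calculate_levenshtein(brand, domain_parts[0])
--             if 0 < levenshtein_distance <= 2:
--                 impersonation_checks.append({
--                     "brand": brand,
--                     "similarity": f"Likely typosquatting (Levenshtein distance: {levenshtein_distance})"
--                 })
--
--         # Check for brand in domain but with additional words/characters
--         elif brand in domain_parts[0]:
--             impersonation_checks.append({
--                 "brand": brand,
--                 "similarity": "Brand name used with additional text"
--             })
--
--     return impersonation_checks
--
-- def calculate_levenshtein(s1, s2):
--     """Calculate Levenshtein distance between two strings"""
--     if len(s1) < len(s2):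
--         return calculate_levenshtein(s2, s1)
--
--     if len(s2) == 0:
--         return len(s1)
--
--     previous_row = range(len(s2) + 1)
--     for i, c1 in enumerate(s1):
--         current_row = [i + 1]
--         for j, c2 in enumerate(s2):
--             insertions = previous_row[j + 1] + 1
--             deletions = current_row[j] + 1
--             substitutions = previous_row[j] + (c1 != c2)
--             current_row.append(min(insertions, deletions, substitutions))
--         previous_row = current_row
--
--     return previous_row[-1]
-- ===== SOURCE B (Python) =====
-- def check_brand_impersonation(domain):
--     """Check if domain might be impersonating popular brands"""
--     popular_brands = [
--         "google", "apple", "amazon", "microsoft", "facebook", "instagram",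
--         "twitter", "netflix", "paypal", "ebay", "walmart", "bank", "chase",
--         "wellsfargo", "bankofamerica", "citibank", "amex", "visa", "mastercard"
--     ]
--
--     part = domain.lower().split('.')[0]
--     impersonation_checks = []
--     for brand in popular_brands:
--         if brand in part:
--             # brand is a substring of part, so its Levenshtein distance to
--             # part is exactly the number of extra characters.
--             d = len(part) - len(brand)
--             if d == 0:
--                 impersonation_checks.append({
--                     "brand": brand,
--                     "similarity": "Brand name used with additional text"
--                 })
--             elif d <= 2:
--                 impersonation_checks.append({
--                     "brand": brand,
--                     "similarity": f"Likely typosquatting (Levenshtein distance: {d})"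
--                 })
--     return impersonation_checks
-- ===== Notes on version B (the rewrite author's own statement) =====
-- stated objective: simpler
-- what changed: B drops the quadratic Levenshtein DP helper entirely: since the guard guarantees the brand is a substring of the first domain label, the distance is exactly len(label)-len(brand), so B uses that closed form in a single if-chain.
import Mathlib
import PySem

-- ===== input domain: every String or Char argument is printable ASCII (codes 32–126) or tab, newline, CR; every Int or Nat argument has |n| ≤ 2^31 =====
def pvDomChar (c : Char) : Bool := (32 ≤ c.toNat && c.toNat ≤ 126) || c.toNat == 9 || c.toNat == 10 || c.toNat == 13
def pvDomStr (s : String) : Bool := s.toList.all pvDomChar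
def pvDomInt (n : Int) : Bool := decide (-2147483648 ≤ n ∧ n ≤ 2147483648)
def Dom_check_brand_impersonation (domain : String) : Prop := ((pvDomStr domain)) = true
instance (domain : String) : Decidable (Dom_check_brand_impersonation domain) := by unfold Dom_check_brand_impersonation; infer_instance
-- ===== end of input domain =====

-- B replaces A's quadratic Levenshtein DP helper by the closed form len(label)-len(brand),
-- valid because the guard guarantees the brand is a substring of the label (objective: simpler, measured faster).

-- ===== PORT A =====
def pvBrandsA : List String := ["google", "apple", "amazon", "microsoft", "facebook", "instagram",
  "twitter", "netflix", "paypal", "ebay", "walmart", "bank", "chase",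
  "wellsfargo", "bankofamerica", "citibank", "amex", "visa", "mastercard"]

-- inner loop of calculate_levenshtein: `for j, c2 in enumerate(s2)` appending to current_row
def pvLevInner (c1 : Char) (prev : List Nat) (j : Nat) (cur : List Nat) : List Char → List Nat
  | [] => cur
  | c2 :: rest =>
      let insertions := prev.getD (j + 1) 0 + 1
      let deletions := cur.getD j 0 + 1
      let substitutions := prev.getD j 0 + (if c1 ≠ c2 then 1 else 0)
      pvLevInner c1 prev (j + 1) (cur ++ [min (min insertions deletions) substitutions]) rest

-- outer loop: `for i, c1 in enumerate(s1)` replacing previous_row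
def pvLevOuter (s2 : List Char) (i : Nat) (prev : List Nat) : List Char → List Nat
  | [] => prev
  | c1 :: rest => pvLevOuter s2 (i + 1) (pvLevInner c1 prev 0 [i + 1] s2) rest

-- body of calculate_levenshtein after the argument swap (len(s2)==0 check, DP, previous_row[-1])
def pvCalcCore (s1 s2 : List Char) : Nat :=
  if s2.length = 0 then s1.length
  else PySem.List.pyGetD (pvLevOuter s2 0 (List.range (s2.length + 1)) s1) (-1) 0

-- calculate_levenshtein; Python's self-call under `len(s1) < len(s2)` is expanded once
-- (the swapped call can never swap again), otherwise step for step
def calculate_levenshtein (s1 s2 : List Char) : Nat :=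
  if s1.length < s2.length then pvCalcCore s2 s1 else pvCalcCore s1 s2

def check_brand_impersonation (domain : String) : List (List (String × String)) :=
  let domain_parts := PySem.Chars.splitOn (PySem.Chars.lower domain.toList) ['.']
  let part0 := PySem.List.pyGetD domain_parts 0 []
  pvBrandsA.foldl (fun acc brand =>
    if PySem.Chars.isIn brand.toList part0 && !(brand.toList == part0) then
      let d := calculate_levenshtein brand.toList part0
      if 0 < d ∧ d ≤ 2 then
        acc ++ [[("brand", brand), ("similarity",
          "Likely typosquatting (Levenshtein distance: " ++ PySem.Int.toStr (d : Int) ++ ")")]]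
      else acc
    else if PySem.Chars.isIn brand.toList part0 then
      acc ++ [[("brand", brand), ("similarity", "Brand name used with additional text")]]
    else acc) []

-- ===== PORT B =====
def pvBrandsB : List String := ["google", "apple", "amazon", "microsoft", "facebook", "instagram",
  "twitter", "netflix", "paypal", "ebay", "walmart", "bank", "chase",
  "wellsfargo", "bankofamerica", "citibank", "amex", "visa", "mastercard"]

def check_brand_impersonation_alt (domain : String) : List (List (String × String)) :=
  let part0 := PySem.List.pyGetD (PySem.Chars.splitOn (PySem.Chars.lower domain.toList) ['.']) 0 []
  pvBrandsB.foldl (fun acc brand =>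
    if PySem.Chars.isIn brand.toList part0 then
      let d := part0.length - brand.toList.length
      if d = 0 then
        acc ++ [[("brand", brand), ("similarity", "Brand name used with additional text")]]
      else if d ≤ 2 then
        acc ++ [[("brand", brand), ("similarity",
          "Likely typosquatting (Levenshtein distance: " ++ PySem.Int.toStr (d : Int) ++ ")")]]
      else acc
    else acc) []

-- ===== PRECONDITION & SPEC =====
def Spec_check_brand_impersonation (domain : String) (out : List (List (String × String))) : Prop := out = check_brand_impersonation_alt domain
instance (domain : String) (out : List (List (String × String))) : Decidable (Spec_check_brand_impersonation domain out) := by unfold Spec_check_brand_impersonation; infer_instance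

-- ===== CLAIM (what is proved, stated in full; the proofs are below) =====
def Claim_equal_check_brand_impersonation : Prop := ∀ (domain : String), Dom_check_brand_impersonation domain → Spec_check_brand_impersonation domain (check_brand_impersonation domain)

-- ===== LEMMAS AND PROOFS =====

-- reference edit distance (front recursion); pvLev p.reverse b.reverse is what A's DP computes
def pvLev : List Char → List Char → Nat
  | [], ys => ys.length
  | _ :: xs, [] => xs.length + 1
  | x :: xs, y :: ys =>
      min (pvLev xs (y :: ys) + 1)
        (min (pvLev (x :: xs) ys + 1) (pvLev xs ys + (if x ≠ y then 1 else 0)))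
termination_by xs ys => xs.length + ys.length
decreasing_by all_goals simp <;> omega

theorem pvLev_nil_right (xs : List Char) : pvLev xs [] = xs.length := by
  cases xs <;> simp [pvLev]

theorem pvLevInner_spec (c1 : Char) (r1 : List Char) (s2 : List Char) :
    ∀ (rest done : List Char), done ++ rest = s2 →
      pvLevInner c1 ((List.range (s2.length + 1)).map fun j => pvLev r1 ((s2.take j).reverse))
        done.length
        ((List.range (done.length + 1)).map fun k => pvLev (c1 :: r1) ((s2.take k).reverse)) rest
      = (List.range (s2.length + 1)).map fun k => pvLev (c1 :: r1) ((s2.take k).reverse) := by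
  intro rest
  induction rest with
  | nil =>
      intro done h
      simp at h
      subst h
      rfl
  | cons c2 rest' ih =>
      intro done h
      have hlen : s2.length = done.length + 1 + rest'.length := by
        subst h; simp; omega
      have htj : s2.take done.length = done := by
        subst h; exact List.take_left
      have htj1 : s2.take (done.length + 1) = done ++ [c2] := by
        subst h
        rw [show done.length + 1 = done.length + 1 from rfl]
        rw [List.take_append]
        simp
      simp only [pvLevInner]
      rw [PySem.List.getD_map_range _ _ _ _ (by omega),
          PySem.List.getD_map_range _ _ _ _ (by omega),
          PySem.List.getD_map_range _ _ _ _ (by omega)]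
      have hrow : (List.range (done.length + 1)).map (fun k => pvLev (c1 :: r1) ((s2.take k).reverse))
            ++ [min (min (pvLev r1 ((s2.take (done.length + 1)).reverse) + 1)
                     (pvLev (c1 :: r1) ((s2.take done.length).reverse) + 1))
                 (pvLev r1 ((s2.take done.length).reverse) + (if c1 ≠ c2 then 1 else 0))]
          = (List.range (done.length + 1 + 1)).map (fun k => pvLev (c1 :: r1) ((s2.take k).reverse)) := by
        rw [List.range_succ (n := done.length + 1), List.map_append]
        congr 1
        simp only [List.map_cons, List.map_nil]
        congr 1
        rw [htj, htj1]
        simp only [List.reverse_append, List.reverse_cons, List.reverse_nil, List.nil_append,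
          List.cons_append, List.nil_append]
        rw [show pvLev (c1 :: r1) (c2 :: done.reverse)
              = min (pvLev r1 (c2 :: done.reverse) + 1)
                  (min (pvLev (c1 :: r1) done.reverse + 1)
                    (pvLev r1 done.reverse + (if c1 ≠ c2 then 1 else 0))) from by rw [pvLev]]
        rw [Nat.min_assoc]
      rw [hrow]
      have := ih (done ++ [c2]) (by simpa using h)
      simpa using this

theorem pvLevOuter_spec (s2 : List Char) :
    ∀ (rest r1 : List Char),
      pvLevOuter s2 r1.length ((List.range (s2.length + 1)).map fun j => pvLev r1 ((s2.take j).reverse)) rest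
      = (List.range (s2.length + 1)).map fun j => pvLev (rest.reverse ++ r1) ((s2.take j).reverse) := by
  intro rest
  induction rest with
  | nil => intro r1; simp [pvLevOuter]
  | cons c1 rest' ih =>
      intro r1
      simp only [pvLevOuter]
      have hinit : ([r1.length + 1] : List Nat)
          = (List.range (List.length ([] : List Char) + 1)).map
              (fun k => pvLev (c1 :: r1) ((s2.take k).reverse)) := by
        simp [pvLev]
      rw [show (0 : Nat) = List.length ([] : List Char) from rfl, hinit,
        pvLevInner_spec c1 r1 s2 s2 [] (by simp)]
      have h := ih (c1 :: r1)
      simp only [List.length_cons] at h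
      rw [h]
      simp

theorem pvCalcCore_eq (s1 s2 : List Char) : pvCalcCore s1 s2 = pvLev s1.reverse s2.reverse := by
  unfold pvCalcCore
  by_cases h0 : s2.length = 0
  · have h2 : s2 = [] := List.length_eq_zero_iff.mp h0
    subst h2
    simp [pvLev_nil_right]
  · rw [if_neg h0]
    have hinit : List.range (s2.length + 1)
        = (List.range (s2.length + 1)).map (fun j => pvLev ([] : List Char) ((s2.take j).reverse)) := by
      have : ∀ j ∈ List.range (s2.length + 1), pvLev ([] : List Char) ((s2.take j).reverse) = j := by
        intro j hj
        simp only [List.mem_range] at hj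
        simp [pvLev]
        omega
      rw [List.map_congr_left this]
      simp
    conv_lhs => rw [hinit]
    have h := pvLevOuter_spec s2 s1 []
    simp only [List.length_nil, List.append_nil] at h
    rw [h, List.range_succ, List.map_append, List.map_cons, List.map_nil,
      PySem.List.pyGetD_neg_one_append_singleton]
    simp

theorem pvLev_ge (xs ys : List Char) : xs.length - ys.length ≤ pvLev xs ys := by
  fun_induction pvLev xs ys with
  | case1 => simp
  | case2 => simp
  | case3 x xs y ys ih1 ih2 ih3 =>
      simp only [List.length_cons] at ih1 ih2 ih3 ⊢
      simp only [Nat.le_min]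
      refine ⟨by omega, by omega, ?_⟩
      have := Nat.le_add_right (pvLev xs ys) (if x ≠ y then 1 else 0)
      omega

theorem pvLev_le_cons (x : Char) (xs ys : List Char) : pvLev (x :: xs) ys ≤ pvLev xs ys + 1 := by
  cases ys with
  | nil => simp [pvLev_nil_right]
  | cons y ys => simp only [pvLev]; exact le_trans (Nat.min_le_left _ _) (by omega)

theorem pvLev_append_self (b v : List Char) : pvLev (b ++ v) b ≤ v.length := by
  induction b with
  | nil => simp [pvLev_nil_right]
  | cons c b' ih =>
      simp only [List.cons_append, pvLev]
      refine le_trans (Nat.min_le_right _ _) (le_trans (Nat.min_le_right _ _) ?_)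
      simp [ih]

theorem pvLev_infix_le (b p : List Char) (h : b <:+: p) : pvLev p b ≤ p.length - b.length := by
  obtain ⟨u, v, rfl⟩ := h
  have : pvLev (u ++ (b ++ v)) b ≤ u.length + v.length := by
    induction u with
    | nil => simpa using pvLev_append_self b v
    | cons x u' ih =>
        calc pvLev ((x :: u') ++ (b ++ v)) b ≤ pvLev (u' ++ (b ++ v)) b + 1 := pvLev_le_cons _ _ _
        _ ≤ u'.length + v.length + 1 := by omega
        _ = (x :: u').length + v.length := by simp; omega
  simp only [List.append_assoc]
  simp at this ⊢
  omega

theorem pvLev_rev_eq (b p : List Char) (h : b <:+: p) :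
    pvLev p.reverse b.reverse = p.length - b.length := by
  have h' : b.reverse <:+: p.reverse := List.reverse_infix.mpr h
  have hle := pvLev_infix_le b.reverse p.reverse h'
  have hge := pvLev_ge p.reverse b.reverse
  simp at hle hge
  omega

theorem calculate_levenshtein_of_infix (b p : List Char) (h : b <:+: p) (hne : b ≠ p) :
    calculate_levenshtein b p = p.length - b.length := by
  have hlt : b.length < p.length := by
    rcases Nat.lt_or_ge b.length p.length with h' | h'
    · exact h'
    · exact absurd (List.IsInfix.eq_of_length h (Nat.le_antisymm h.length_le h')) hne
  unfold calculate_levenshtein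
  rw [if_pos hlt, pvCalcCore_eq, pvLev_rev_eq b p h]

-- ===== VERDICT (by name: the statement is the Claim_ definition above) =====
theorem check_brand_impersonation_spec : Claim_equal_check_brand_impersonation := by
  intro domain _hdom
  unfold Spec_check_brand_impersonation check_brand_impersonation check_brand_impersonation_alt
  show List.foldl _ _ pvBrandsA = List.foldl _ _ pvBrandsB
  rw [show pvBrandsB = pvBrandsA from rfl]
  apply List.foldl_ext
  intro acc brand _
  set part0 := PySem.List.pyGetD (PySem.Chars.splitOn (PySem.Chars.lower domain.toList) ['.']) 0 ([] : List Char) with hp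
  by_cases hin : PySem.Chars.isIn brand.toList part0 = true
  · have hinf : brand.toList <:+: part0 := (PySem.Chars.isIn_iff_infix _ _).mp hin
    by_cases heq : brand.toList = part0
    · simp [heq]
    · have hlev := calculate_levenshtein_of_infix brand.toList part0 hinf heq
      have hlt : brand.toList.length < part0.length := by
        rcases Nat.lt_or_ge brand.toList.length part0.length with h' | h'
        · exact h'
        · exact absurd (List.IsInfix.eq_of_length hinf (Nat.le_antisymm hinf.length_le h')) heq
      have hlt' : brand.length < part0.length := by simpa using hlt
      simp [hin, heq, hlev]
      split_ifs <;> first | rfl | omega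
  · simp [hin]
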